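-- pv_equiv track=rewrite | github.com/Arttacker/CipherSecurity | math_algorithms/quadratic_residue.py | sqrt_mod_bruteforce
-- ===== SOURCE A (Python) =====
-- def legendre_symbol(a, p):
--     """
--     Compute the Legendre symbol (a/p).
--
--     Parameters:
--     a (int): The integer.
--     p (int): A prime number.
--
--     Returns:
--     int: 1 if 'a' is a quadratic residue modulo 'p',
--         -1 if 'a' is a non-quadratic residue modulo 'p',
--          0 if 'a' is divisible by 'p'.
--     """
--
--     ls = pow(a, (p - 1) // 2, p)
--     return -1 if ls == p - 1 else ls
--
-- def sqrt_mod_bruteforce(a, p):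
--     """
--     Compute the square root of 'n' modulo 'p' if it exists using brute-forcing
--     Parameters:
--     n (int): The integer for which the square root is to be found.
--     p (int): A prime number.
--
--     Returns:
--     list or None: A list containing the two square roots of 'n' modulo 'p' if they exist, otherwise None.
--     """
--     if legendre_symbol(a, p) != 1:
--         return None
--     else:
--         result = []
--         for i in range(1, p):
--             if i**2 % p == a:
--                 result.append(i)
--     return result
-- ===== SOURCE B (Python) =====
-- def legendre_symbol(a, p):
--     ls = pow(a, (p - 1) // 2, p)
--     return -1 if ls == p - 1 else ls
--
-- def sqrt_mod_bruteforce(a, p):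
--     # Roots of a mod p pair up as {i, p - i}: scan only 1..p//2 and mirror,
--     # instead of scanning all of 1..p-1.
--     if legendre_symbol(a, p) != 1:
--         return None
--     lows = [i for i in range(1, p // 2 + 1) if i * i % p == a]
--     return lows + [p - i for i in reversed(lows) if p - i != i]
-- ===== Notes on version B (the rewrite author's own statement) =====
-- stated objective: alternative
-- what changed: Instead of scanning all of 1..p-1, B scans only 1..p//2 for the small roots and produces the large ones by mirroring (p - i, in reverse), using that square roots mod p pair up as {i, p-i}; this halves the scan on quadratic-residue inputs, though on random inputs (mostly non-residues, where both exit at the Legendre check) no speedup is measurable.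
import Mathlib
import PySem

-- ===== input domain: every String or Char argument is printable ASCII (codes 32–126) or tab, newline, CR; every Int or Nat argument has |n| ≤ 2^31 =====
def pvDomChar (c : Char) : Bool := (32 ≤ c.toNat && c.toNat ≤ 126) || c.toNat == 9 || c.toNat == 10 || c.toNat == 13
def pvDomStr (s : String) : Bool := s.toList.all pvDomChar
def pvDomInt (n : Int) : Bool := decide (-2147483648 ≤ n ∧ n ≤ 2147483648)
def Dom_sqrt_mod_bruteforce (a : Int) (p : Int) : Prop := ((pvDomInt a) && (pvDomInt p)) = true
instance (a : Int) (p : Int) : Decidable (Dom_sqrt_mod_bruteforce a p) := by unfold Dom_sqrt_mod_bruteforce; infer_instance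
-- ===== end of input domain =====

-- B scans only 1..p//2 for the small roots and mirrors them (p - i, reversed) into the
-- large ones, instead of scanning all of 1..p-1 (objective: alternative; halves the scan on residue inputs).

-- ===== PORT A =====
-- hand port of Python's three-argument pow(b, e, m) for e ≥ 0, m ≠ 0 (CPython's binary
-- exponentiation, every step reduced by Python's mod; exact there — PySem.Int.powMod computes
-- the same value as mod (b ^ e) m but is not feasibly evaluable for large e)
def powModFast (b : Int) (e : Nat) (m : Int) : Int :=
  if h : e = 0 then PySem.Int.mod 1 m
  else
    let r := powModFast b (e / 2) m
    let r2 := PySem.Int.mod (r * r) m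
    if e % 2 = 1 then PySem.Int.mod (r2 * PySem.Int.mod b m) m else r2
termination_by e
decreasing_by exact Nat.div_lt_self (Nat.pos_of_ne_zero h) (by omega)

-- helper of both Pythons (identical source in Source A and Source B)
def legendre_symbol (a : Int) (p : Int) : Int :=
  let ls := powModFast a ((PySem.Int.floordiv (p - 1) 2).toNat) p
  if ls = p - 1 then -1 else ls

def sqrt_mod_bruteforce (a : Int) (p : Int) : Option (List Int) :=
  if legendre_symbol a p ≠ 1 then none
  else
    some ((PySem.List.pyRange 1 p 1).foldl
      (fun result i => if i ^ 2 % p = a then result ++ [i] else result) [])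

-- ===== PORT B =====
-- Source B: lows by comprehension over range(1, p//2+1), then mirrored in reverse
def sqrt_mod_bruteforce_alt (a : Int) (p : Int) : Option (List Int) :=
  if legendre_symbol a p ≠ 1 then none
  else
    let lows := (PySem.List.pyRange 1 (PySem.Int.floordiv p 2 + 1) 1).filter
      (fun i => decide (i * i % p = a))
    some (lows ++ (lows.reverse.filter (fun i => decide (p - i ≠ i))).map (fun i => p - i))

-- ===== PRECONDITION & SPEC =====
-- Pre_ is exactly where Python's pow (hence A) returns: it excludes p = 0 (ValueError) and
-- p < 0 with gcd(a, p) ≠ 1 (the exponent (p-1)//2 is negative and a has no inverse: ValueError);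
-- A raises on every excluded input, so Pre_ excludes no input A returns on.
def Pre_sqrt_mod_bruteforce (a : Int) (p : Int) : Prop :=
  p ≠ 0 ∧ (1 ≤ p ∨ Int.gcd a p = 1)
instance (a : Int) (p : Int) : Decidable (Pre_sqrt_mod_bruteforce a p) := by
  unfold Pre_sqrt_mod_bruteforce; infer_instance

def pvWitness_sqrt_mod_bruteforce : Int × Int := (2, 7)

def Spec_sqrt_mod_bruteforce (a : Int) (p : Int) (out : Option (List Int)) : Prop :=
  out = sqrt_mod_bruteforce_alt a p
instance (a : Int) (p : Int) (out : Option (List Int)) : Decidable (Spec_sqrt_mod_bruteforce a p out) := by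
  unfold Spec_sqrt_mod_bruteforce; infer_instance

-- ===== CLAIM (what is proved, stated in full; the proofs are below) =====
def Claim_equal_sqrt_mod_bruteforce : Prop := ∀ (a : Int) (p : Int), Dom_sqrt_mod_bruteforce a p → Pre_sqrt_mod_bruteforce a p → Spec_sqrt_mod_bruteforce a p (sqrt_mod_bruteforce a p)

-- ===== LEMMAS AND PROOFS =====

-- filter after map is map after the pulled-back filter
theorem pv_filter_map {α β : Type} (f : α → β) (q : β → Bool) (l : List α) :
    (l.map f).filter q = (l.filter (fun x => q (f x))).map f := by
  induction l with
  | nil => rfl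
  | cons x xs ih => simp only [List.map_cons, List.filter_cons]; split <;> simp [ih]

-- (p - x)² and x² agree mod p
theorem hit_reflect (p x a : Int) (h : x * x % p = a) : (p - x) * (p - x) % p = a := by
  have hx : (p - x) * (p - x) = x * x + p * (p - 2 * x) := by ring
  rw [hx, Int.add_mul_emod_self_left, h]

-- for p < 0 the Python-mod result of pow lies in (p, 0], so the Legendre value is never 1
theorem legendre_neg (a p : Int) (hp : p ≤ -1) : legendre_symbol a p ≠ 1 := by
  unfold legendre_symbol
  have he : (PySem.Int.floordiv (p - 1) 2).toNat = 0 := by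
    rw [PySem.Int.floordiv_eq_ediv_of_pos (by omega)]; omega
  rw [he]
  have hb := PySem.Int.mod_neg_bounds (a := (1 : Int)) (b := p) (by omega)
  have h0 : powModFast a 0 p = PySem.Int.mod 1 p := by rw [powModFast]; rfl
  rw [h0]
  show (if PySem.Int.mod 1 p = p - 1 then (-1 : Int) else PySem.Int.mod 1 p) ≠ 1
  split_ifs <;> omega

-- the upper half of 1..p-1 is the mirror (p - ·) of the reversed lower half 1..p//2
theorem mirror_range (p : Int) (hp : 1 ≤ p) :
    ((PySem.List.pyRange 1 (p / 2 + 1) 1).reverse.filter (fun i => decide (p - i ≠ i))).map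
      (fun i => p - i) = PySem.List.pyRange (p / 2 + 1) p 1 := by
  have hrev : (PySem.List.pyRange 1 (p / 2 + 1) 1).reverse = PySem.List.pyRange (p / 2) 0 (-1) := by
    rw [PySem.List.pyRange_neg_one_eq_reverse]; norm_num
  rw [hrev, PySem.List.pyRange_neg_one, PySem.List.pyRange_one, pv_filter_map]
  rcases Int.emod_two_eq p with heven | hodd
  · -- p even (p ≥ 2): the fixed point p/2 is the head of the reversed list and is dropped
    have hn : (p / 2 - 0).toNat = (p / 2 - 1).toNat + 1 := by omega
    rw [hn, List.range_succ_eq_map, List.filter_cons]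
    have h0 : (decide (p - (p / 2 - (0 : Nat)) ≠ p / 2 - (0 : Nat))) = false := by
      simp; omega
    rw [h0]
    simp only [Bool.false_eq_true, if_false, pv_filter_map]
    have hall : (List.range (p / 2 - 1).toNat).filter
        (fun k => decide (p - (p / 2 - (Nat.succ k : Nat)) ≠ p / 2 - (Nat.succ k : Nat))) =
        List.range (p / 2 - 1).toNat := by
      rw [List.filter_eq_self]
      intro k _
      simp; omega
    rw [hall]
    have hlen : ((p - (p / 2 + 1)).toNat) = (p / 2 - 1).toNat := by omega
    rw [hlen, List.map_map, List.map_map]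
    apply List.map_congr_left
    intro k _
    simp only [Function.comp_apply]
    omega
  · -- p odd: no fixed point, the filter keeps everything
    have hall : (List.range (p / 2 - 0).toNat).filter
        (fun k => decide (p - (p / 2 - (k : Nat)) ≠ p / 2 - (k : Nat))) =
        List.range (p / 2 - 0).toNat := by
      rw [List.filter_eq_self]
      intro k _
      simp; omega
    rw [hall]
    have hlen : ((p - (p / 2 + 1)).toNat) = (p / 2 - 0).toNat := by omega
    rw [hlen, List.map_map]
    apply List.map_congr_left
    intro k _
    simp only [Function.comp_apply]
    omega

-- ===== VERDICT (by name: the statement is the Claim_ definition above) =====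
theorem sqrt_mod_bruteforce_spec : Claim_equal_sqrt_mod_bruteforce := by
  intro a p _ hpre
  obtain ⟨hp0, _⟩ := hpre
  unfold Spec_sqrt_mod_bruteforce
  by_cases hL : legendre_symbol a p = 1
  · rcases lt_or_ge p 0 with hpneg | hppos
    · exact absurd hL (legendre_neg a p (by omega))
    have hp1 : (1 : Int) ≤ p := by omega
    have hfd : PySem.Int.floordiv p 2 = p / 2 := PySem.Int.floordiv_eq_ediv_of_pos (by omega)
    simp only [sqrt_mod_bruteforce, sqrt_mod_bruteforce_alt, hL, ne_eq, not_true_eq_false,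
      if_false, hfd]
    rw [PySem.List.foldl_append_ite_eq_filter (fun i => i ^ 2 % p = a)]
    simp only [List.nil_append, Option.some.injEq]
    have hPP : (PySem.List.pyRange 1 p 1).filter (fun i => decide (i ^ 2 % p = a)) =
        (PySem.List.pyRange 1 p 1).filter (fun i => decide (i * i % p = a)) :=
      List.filter_congr (by intro x _; simp [pow_two])
    rw [hPP, PySem.List.pyRange_one_append 1 (p / 2 + 1) p (by omega) (by omega),
      List.filter_append]
    congr 1
    rw [← mirror_range p hp1, pv_filter_map, ← List.filter_reverse, List.filter_filter,
      List.filter_filter]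
    apply congrArg
    apply List.filter_congr
    intro x _
    have hiff : (x * x % p = a) ↔ ((p - x) * (p - x) % p = a) := by
      constructor
      · exact hit_reflect p x a
      · intro h
        have := hit_reflect p (p - x) a h
        simpa using this
    by_cases hx : x * x % p = a
    · simp [hx, hiff.mp hx, Bool.and_comm]
    · simp [hx]
      intro h
      exact absurd (hiff.mpr h) hx
  · simp [sqrt_mod_bruteforce, sqrt_mod_bruteforce_alt, hL]
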